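-- pv_equiv track=rewrite | github.com/Luminoid/plantfolio-common-plants | scripts/audit_duplicates.py | find_duplicate_typenames
-- ===== SOURCE A (Python) =====
-- from collections import defaultdict
--
-- def find_duplicate_typenames(data: list) -> dict[str, list[str]]:
--     """Return {typeName: [id1, id2, ...]} for typeNames that appear more than once."""
--     by_tn = defaultdict(list)
--     for e in data:
--         if isinstance(e, dict) and "_metadata" not in e and "typeName" in e:
--             tn = (e.get("typeName") or "").strip()
--             if tn:
--                 by_tn[tn].append(e.get("id", ""))
--     return {k: v for k, v in by_tn.items() if len(v) > 1}
-- ===== SOURCE B (Python) =====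
-- def find_duplicate_typenames(data: list) -> dict[str, list[str]]:
--     """Two passes: count typeNames first, then collect ids only for duplicated ones."""
--     counts = {}
--     for e in data:
--         if isinstance(e, dict) and "_metadata" not in e and "typeName" in e:
--             tn = (e.get("typeName") or "").strip()
--             if tn:
--                 counts[tn] = counts.get(tn, 0) + 1
--     result = {}
--     for e in data:
--         if isinstance(e, dict) and "_metadata" not in e and "typeName" in e:
--             tn = (e.get("typeName") or "").strip()
--             if tn and counts[tn] > 1:
--                 result.setdefault(tn, []).append(e.get("id", ""))
--     return result
-- ===== Notes on version B (the rewrite author's own statement) =====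
-- stated objective: alternative
-- what changed: Replaces the single grouping pass plus final length-filter by two passes: a first pass counts qualifying typeNames, a second pass appends ids only for typeNames whose count exceeds one, so no per-key id lists are ever built for unique typeNames.
import Mathlib
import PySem

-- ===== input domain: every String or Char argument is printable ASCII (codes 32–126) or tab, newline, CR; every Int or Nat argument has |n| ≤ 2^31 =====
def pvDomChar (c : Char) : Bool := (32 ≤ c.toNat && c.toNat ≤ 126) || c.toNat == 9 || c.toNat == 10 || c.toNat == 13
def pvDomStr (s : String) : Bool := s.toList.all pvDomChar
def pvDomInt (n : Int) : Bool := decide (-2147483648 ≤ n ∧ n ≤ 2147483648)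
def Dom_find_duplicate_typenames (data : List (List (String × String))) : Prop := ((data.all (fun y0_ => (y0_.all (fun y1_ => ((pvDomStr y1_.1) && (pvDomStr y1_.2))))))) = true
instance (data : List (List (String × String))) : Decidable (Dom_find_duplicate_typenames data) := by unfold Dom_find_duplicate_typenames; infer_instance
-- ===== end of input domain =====

-- B replaces A's single grouping pass + final length-filter by two passes (count qualifying
-- typeNames, then collect ids only for typeNames counted more than once): a different decomposition.

-- ===== PORT A =====
-- one pass: group every qualifying id under its typeName, then keep groups of length > 1
def find_duplicate_typenames (data : List (List (String × String))) : List (String × List String) :=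
  (data.foldl (fun d e =>
      let ed : PySem.Dict String String := PySem.Dict.mk e
      if !(ed.contains "_metadata") && ed.contains "typeName" then
        -- (e.get("typeName") or "").strip(): the 'or ""' maps only None/"" to "", which strip sends to "" anyway
        let tn := PySem.Str.strip ((ed.get? "typeName").getD "")
        if tn ≠ "" then d.modify tn [] (· ++ [ed.getD "id" ""]) else d
      else d) PySem.Dict.empty).items.filter (fun kv => kv.2.length > 1)

-- ===== PORT B =====
-- B's first pass (the local `counts` of Source B): count each qualifying typeName
def pvCountsB (data : List (List (String × String))) : PySem.Dict String Int :=
  data.foldl (fun c e =>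
    let ed : PySem.Dict String String := PySem.Dict.mk e
    if !(ed.contains "_metadata") && ed.contains "typeName" then
      let tn := PySem.Str.strip ((ed.get? "typeName").getD "")
      if tn ≠ "" then c.insert tn (c.getD tn 0 + 1) else c
    else c) PySem.Dict.empty

-- B's second pass: append ids only where the count exceeds one
def find_duplicate_typenames_alt (data : List (List (String × String))) : List (String × List String) :=
  (data.foldl (fun r e =>
      let ed : PySem.Dict String String := PySem.Dict.mk e
      if !(ed.contains "_metadata") && ed.contains "typeName" then
        let tn := PySem.Str.strip ((ed.get? "typeName").getD "")
        if tn ≠ "" ∧ (pvCountsB data).getD tn 0 > 1 then r.modify tn [] (· ++ [ed.getD "id" ""]) else r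
      else r) PySem.Dict.empty).items

-- ===== PRECONDITION & SPEC =====
def Spec_find_duplicate_typenames (data : List (List (String × String))) (out : List (String × List String)) : Prop := out = find_duplicate_typenames_alt data
instance (data : List (List (String × String))) (out : List (String × List String)) : Decidable (Spec_find_duplicate_typenames data out) := by unfold Spec_find_duplicate_typenames; infer_instance

-- ===== CLAIM (what is proved, stated in full; the proofs are below) =====
def Claim_equal_find_duplicate_typenames : Prop := ∀ (data : List (List (String × String))), Dom_find_duplicate_typenames data → Spec_find_duplicate_typenames data (find_duplicate_typenames data)

-- ===== LEMMAS AND PROOFS =====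

-- the (typeName, id) pairs of the qualifying entries, in data order: both ports are folds over this list
def pvQualPairs (data : List (List (String × String))) : List (String × String) :=
  data.flatMap (fun e =>
    let ed : PySem.Dict String String := PySem.Dict.mk e
    if !(ed.contains "_metadata") && ed.contains "typeName" then
      let tn := PySem.Str.strip ((ed.get? "typeName").getD "")
      if tn ≠ "" then [(tn, ed.getD "id" "")] else []
    else [])

-- A's grouping loop is the grouping fold over the qualifying pairs
theorem pvA_fold (data : List (List (String × String))) (d : PySem.Dict String (List String)) :
    data.foldl (fun d e =>
      let ed : PySem.Dict String String := PySem.Dict.mk e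
      if !(ed.contains "_metadata") && ed.contains "typeName" then
        let tn := PySem.Str.strip ((ed.get? "typeName").getD "")
        if tn ≠ "" then d.modify tn [] (· ++ [ed.getD "id" ""]) else d
      else d) d
    = (pvQualPairs data).foldl (fun d p => d.modify p.1 [] (· ++ [p.2])) d := by
  induction data generalizing d with
  | nil => simp [pvQualPairs]
  | cons e data ih =>
      simp only [pvQualPairs] at ih ⊢
      simp only [List.flatMap_cons, List.foldl_append, List.foldl_cons]
      generalize (PySem.Dict.mk e : PySem.Dict String String) = ed
      generalize PySem.Str.strip ((PySem.Dict.get? ed "typeName").getD "") = tn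
      generalize PySem.Dict.getD ed "id" "" = idv
      split_ifs <;> simp_all

-- B's counting loop is the counting fold over the qualifying typeNames
theorem pvB_count_fold (data : List (List (String × String))) (c : PySem.Dict String Int) :
    data.foldl (fun c e =>
      let ed : PySem.Dict String String := PySem.Dict.mk e
      if !(ed.contains "_metadata") && ed.contains "typeName" then
        let tn := PySem.Str.strip ((ed.get? "typeName").getD "")
        if tn ≠ "" then c.insert tn (c.getD tn 0 + 1) else c
      else c) c
    = ((pvQualPairs data).map Prod.fst).foldl (fun c k => c.insert k (c.getD k 0 + 1)) c := by
  induction data generalizing c with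
  | nil => simp [pvQualPairs]
  | cons e data ih =>
      simp only [pvQualPairs] at ih ⊢
      simp only [List.flatMap_cons, List.map_append, List.foldl_append, List.foldl_cons]
      generalize (PySem.Dict.mk e : PySem.Dict String String) = ed
      generalize PySem.Str.strip ((PySem.Dict.get? ed "typeName").getD "") = tn
      generalize PySem.Dict.getD ed "id" "" = idv
      split_ifs <;> simp_all

-- B's collecting loop is the grouping fold over the qualifying pairs whose typeName count exceeds 1
theorem pvB_res_fold (data : List (List (String × String))) (cd : PySem.Dict String Int)
    (r : PySem.Dict String (List String)) :
    data.foldl (fun r e =>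
      let ed : PySem.Dict String String := PySem.Dict.mk e
      if !(ed.contains "_metadata") && ed.contains "typeName" then
        let tn := PySem.Str.strip ((ed.get? "typeName").getD "")
        if tn ≠ "" ∧ cd.getD tn 0 > 1 then r.modify tn [] (· ++ [ed.getD "id" ""]) else r
      else r) r
    = ((pvQualPairs data).filter (fun p => decide (cd.getD p.1 0 > 1))).foldl
        (fun r p => r.modify p.1 [] (· ++ [p.2])) r := by
  induction data generalizing r with
  | nil => simp [pvQualPairs]
  | cons e data ih =>
      simp only [pvQualPairs] at ih ⊢
      simp only [List.flatMap_cons, List.filter_append, List.foldl_append, List.foldl_cons]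
      generalize (PySem.Dict.mk e : PySem.Dict String String) = ed
      generalize PySem.Str.strip ((PySem.Dict.get? ed "typeName").getD "") = tn
      generalize PySem.Dict.getD ed "id" "" = idv
      split_ifs <;> simp_all

-- Set.ofList (first occurrences) commutes with filter
theorem pv_set_ofList_filter (xs : List String) (p : String → Bool) :
    PySem.Set.ofList (xs.filter p) = (PySem.Set.ofList xs).filter p := by
  rw [PySem.Set.ofList_eq_foldl, PySem.Set.ofList_eq_foldl]
  suffices h : ∀ (s : PySem.Set String),
      (xs.filter p).foldl PySem.Set.add (s.filter p) = (xs.foldl PySem.Set.add s).filter p by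
    simpa using h []
  induction xs with
  | nil => intro s; simp
  | cons x xs ih =>
      intro s
      by_cases hp : p x
      · have hadd : (PySem.Set.add s x).filter p = PySem.Set.add (s.filter p) x := by
          by_cases hm : x ∈ s <;>
            simp [PySem.Set.add, hm, hp, List.filter_append, List.mem_filter]
        simp only [List.filter_cons, hp, if_pos, List.foldl_cons]
        rw [← hadd, ih]
      · have hadd : (PySem.Set.add s x).filter p = s.filter p := by
          by_cases hm : x ∈ s <;>
            simp [PySem.Set.add, hm, hp, List.filter_append]
        have hfx : p x = false := by
          cases hcb : p x
          · rfl
          · exact absurd hcb hp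
        simp only [List.filter_cons, hfx, Bool.false_eq_true, if_neg, not_false_iff,
          List.foldl_cons]
        rw [← hadd, ih]

-- the grouping fold characterized: first-occurrence keys, each with all its values in order
theorem pvGrp_items (ps : List (String × String)) :
    ((ps.foldl (fun d p => d.modify p.1 [] (· ++ [p.2])) PySem.Dict.empty).items)
    = (PySem.Set.ofList (ps.map Prod.fst)).map
        (fun k => (k, (ps.filter (fun p => p.1 == k)).map Prod.snd)) := by
  have hkeys : ((ps.foldl (fun d p => d.modify p.1 [] (· ++ [p.2])) PySem.Dict.empty).keys)
      = PySem.Set.ofList (ps.map Prod.fst) := by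
    rw [PySem.Dict.keys_foldl_modify_key ps Prod.fst [] (fun _ p v => v ++ [p.2])]
    rw [PySem.Dict.keys_empty, PySem.Set.ofList_eq_foldl]
    rfl
  have hnodup := PySem.Dict.nodup_keys_foldl_modify_key ps Prod.fst [] (fun _ p v => v ++ [p.2])
      PySem.Dict.empty PySem.Dict.nodup_keys_empty
  rw [PySem.Dict.items_eq_map_keys _ hnodup [], hkeys]
  apply List.map_congr_left
  intro k _
  rw [PySem.Dict.getD_foldl_modify_append, PySem.Dict.getD_empty]
  simp

-- per-key group length = typeName count
theorem pv_len_count (ps : List (String × String)) (k : String) :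
    ((ps.filter (fun p => p.1 == k)).map Prod.snd).length = (ps.map Prod.fst).count k := by
  induction ps with
  | nil => simp
  | cons p ps ih =>
      by_cases h : p.1 = k
      · simp [h, ih]
      · simp [h, ih]

-- core: filtering A's groups by length > 1 = grouping only the pairs whose count exceeds 1
theorem pv_main (ps : List (String × String)) (cd : PySem.Dict String Int)
    (hc : ∀ k, cd.getD k 0 = ((ps.map Prod.fst).count k : Int)) :
    ((ps.foldl (fun d p => d.modify p.1 [] (· ++ [p.2])) PySem.Dict.empty).items).filter
        (fun kv => kv.2.length > 1)
    = ((ps.filter (fun p => decide (cd.getD p.1 0 > 1))).foldl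
        (fun r p => r.modify p.1 [] (· ++ [p.2])) PySem.Dict.empty).items := by
  rw [pvGrp_items, pvGrp_items]
  rw [List.filter_map]
  have hmapfst : (ps.filter (fun p => decide (cd.getD p.1 0 > 1))).map Prod.fst
      = (ps.map Prod.fst).filter (fun k => decide (cd.getD k 0 > 1)) := by
    rw [List.filter_map]; rfl
  rw [hmapfst, pv_set_ofList_filter]
  have hpred : ∀ k, ((fun kv : String × List String => decide (kv.2.length > 1)) ∘
        (fun k => (k, (ps.filter (fun p => p.1 == k)).map Prod.snd))) k
      = (fun k => decide (cd.getD k 0 > 1)) k := by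
    intro k
    simp only [Function.comp]
    rw [pv_len_count, hc k]
    simp only [decide_eq_decide]
    omega
  rw [List.filter_congr (fun k _ => hpred k)]
  apply List.map_congr_left
  intro k hk
  have hkgt : cd.getD k 0 > 1 := by
    have := (List.mem_filter.mp hk).2
    simpa using this
  have hff : (ps.filter (fun p => decide (cd.getD p.1 0 > 1))).filter (fun p => p.1 == k)
      = ps.filter (fun p => p.1 == k) := by
    rw [List.filter_filter]
    apply List.filter_congr
    intro a _
    by_cases ha : a.1 = k
    · subst ha; simp [hkgt]
    · simp [ha]
  rw [hff]

-- ===== VERDICT (by name: the statement is the Claim_ definition above) =====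
theorem find_duplicate_typenames_spec : Claim_equal_find_duplicate_typenames := by
  intro data _
  unfold Spec_find_duplicate_typenames find_duplicate_typenames find_duplicate_typenames_alt
  rw [pvA_fold, pvB_res_fold]
  exact pv_main (pvQualPairs data) (pvCountsB data) (fun k => by
    unfold pvCountsB
    rw [pvB_count_fold, PySem.Dict.getD_foldl_insert_add_one, PySem.Dict.getD_empty]
    simp)
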